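-- pv_equiv track=rewrite | github.com/KuramitsuLab/pegtree | pegtree/optimizer.py | bitsetRange
-- ===== SOURCE A (Python) =====
-- def bitsetRange(chars, ranges):
--     cs = 0
--     for c in chars:
--         cs |= 1 << ord(c)
--     r = ranges
--     while len(r) > 1:
--         for c in range(ord(r[0]), ord(r[1])+1):
--             cs |= 1 << c
--         r = r[2:]
--     return cs
-- ===== SOURCE B (Python) =====
-- def bitsetRange(chars, ranges):
--     cs = 0
--     for c in chars:
--         cs |= 1 << ord(c)
--     it = iter(ranges)
--     for lo, hi in zip(it, it):
--         a, b = ord(lo), ord(hi)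
--         if a <= b:
--             cs |= ((1 << (b + 1)) - 1) ^ ((1 << a) - 1)
--     return cs
-- ===== Notes on version B (the rewrite author's own statement) =====
-- stated objective: faster
-- what changed: Each character range is ORed in as one contiguous bitmask ((1<<(b+1))-1)^((1<<a)-1) over the pairs of `ranges`, instead of looping over every code point of every range.
import Mathlib
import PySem

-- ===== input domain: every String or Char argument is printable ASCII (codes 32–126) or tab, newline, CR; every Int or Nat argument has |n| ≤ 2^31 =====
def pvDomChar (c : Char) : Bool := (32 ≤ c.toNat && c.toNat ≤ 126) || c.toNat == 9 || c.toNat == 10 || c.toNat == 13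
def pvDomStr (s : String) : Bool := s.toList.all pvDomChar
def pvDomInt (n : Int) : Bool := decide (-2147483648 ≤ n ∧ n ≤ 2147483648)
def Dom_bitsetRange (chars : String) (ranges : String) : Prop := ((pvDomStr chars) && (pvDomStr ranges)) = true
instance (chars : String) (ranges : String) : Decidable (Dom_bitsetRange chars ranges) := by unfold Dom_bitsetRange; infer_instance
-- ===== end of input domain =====

-- B replaces A's per-code-point inner loop by one contiguous bitmask per range pair (objective: faster, asymptotic in total range width).


-- ===== PORT A =====
-- `cs |= 1 << ord(c)`; the shift amount ord(c) is a Nat, exact for Python's `<<`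
def pvAOrBit (cs : Int) (c : Int) : Int := PySem.Int.bor cs ((1 : Int) <<< c.toNat)

-- the `while len(r) > 1` loop: one pyRange fold per leading pair, then r = r[2:]
def pvALoop (cs : Int) (r : List Char) : Int :=
  match r with
  | c0 :: c1 :: rest =>
      pvALoop ((PySem.List.pyRange (c0.toNat : Int) ((c1.toNat : Int) + 1) 1).foldl pvAOrBit cs) rest
  | _ => cs

def bitsetRange (chars : String) (ranges : String) : Int :=
  pvALoop (chars.toList.foldl (fun cs c => PySem.Int.bor cs ((1 : Int) <<< c.toNat)) 0) ranges.toList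

-- ===== PORT B =====
-- zip(it, it) over iter(ranges): consecutive pairs
def pvPairs : List Char → List (Char × Char)
  | c0 :: c1 :: rest => (c0, c1) :: pvPairs rest
  | _ => []

-- one mask per pair: ((1 << (b+1)) - 1) ^ ((1 << a) - 1)
def pvMaskStep (cs : Int) (p : Char × Char) : Int :=
  if p.1.toNat ≤ p.2.toNat then
    PySem.Int.bor cs (PySem.Int.bxor ((1 : Int) <<< (p.2.toNat + 1) - 1) ((1 : Int) <<< p.1.toNat - 1))
  else cs

def bitsetRange_alt (chars : String) (ranges : String) : Int :=
  (pvPairs ranges.toList).foldl pvMaskStep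
    (chars.toList.foldl (fun cs c => PySem.Int.bor cs ((1 : Int) <<< c.toNat)) 0)

-- ===== PRECONDITION & SPEC =====
def Spec_bitsetRange (chars : String) (ranges : String) (out : Int) : Prop := out = bitsetRange_alt chars ranges
instance (chars : String) (ranges : String) (out : Int) : Decidable (Spec_bitsetRange chars ranges out) := by unfold Spec_bitsetRange; infer_instance

-- ===== CLAIM (what is proved, stated in full; the proofs are below) =====
def Claim_equal_bitsetRange : Prop := ∀ (chars : String) (ranges : String), Dom_bitsetRange chars ranges → Spec_bitsetRange chars ranges (bitsetRange chars ranges)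

-- ===== LEMMAS AND PROOFS =====

-- Nat-level mask for bits a, …, a+n-1
def pvMaskN (a n : Nat) : Nat := ((1 <<< (a + n)) - 1) ^^^ ((1 <<< a) - 1)

theorem pvMaskN_succ (a n : Nat) : pvMaskN a (n + 1) = pvMaskN a n ||| (1 <<< (a + n)) := by
  unfold pvMaskN
  apply Nat.eq_of_testBit_eq
  intro i
  simp [Nat.testBit_two_pow_sub_one, Nat.one_shiftLeft, Nat.testBit_two_pow]
  by_cases h1 : i < a + (n + 1) <;> by_cases h2 : i < a <;> by_cases h3 : i < a + n <;>
    by_cases h4 : a + n = i <;> simp [h1, h2, h3, h4] <;> omega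

theorem pv_shift_cast (k : Nat) : ((1 : Int) <<< (k : Int)) = ((1 <<< k : Nat) : Int) := by
  rw [Int.one_shiftLeft]
  simp [Nat.one_shiftLeft]

theorem pv_shift_cast_nat (k : Nat) : ((1 : Int) <<< k) = ((1 <<< k : Nat) : Int) := by
  rw [Int.shiftLeft_eq]
  push_cast [Nat.one_shiftLeft]
  ring

theorem pv_shift_sub_cast (k : Nat) : (1 : Int) <<< k - (1 : Int) = (((1 <<< k) - 1 : Nat) : Int) := by
  have h : 1 ≤ (1 <<< k : Nat) := by
    rw [Nat.one_shiftLeft]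
    exact Nat.one_le_two_pow
  rw [pv_shift_cast_nat, Nat.cast_sub h, Nat.cast_one]

-- char/bit fold over a Nat-cast accumulator stays a Nat cast
theorem pv_charFold_cast (l : List Char) (m : Nat) :
    l.foldl (fun cs c => PySem.Int.bor cs ((1 : Int) <<< c.toNat)) (m : Int)
      = ((l.foldl (fun m c => m ||| (1 <<< c.toNat)) m : Nat) : Int) := by
  induction l generalizing m with
  | nil => rfl
  | cons c l ih =>
    rw [List.foldl_cons, List.foldl_cons, pv_shift_cast, PySem.Int.bor_natCast]
    exact ih _

-- the inner per-code-point fold of A equals ORing the contiguous mask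
theorem pv_rangeFold (a n m : Nat) :
    (PySem.List.pyRange (a : Int) ((a : Int) + (n : Int)) 1).foldl pvAOrBit (m : Int)
      = ((m ||| pvMaskN a n : Nat) : Int) := by
  induction n generalizing m with
  | zero =>
    rw [PySem.List.pyRange_one_eq_nil (by push_cast; omega)]
    simp [pvMaskN]
  | succ n ih =>
    rw [show ((a : Int) + ((n + 1 : Nat) : Int)) = ((a : Int) + (n : Nat)) + 1 by push_cast; ring,
        PySem.List.pyRange_one_succ_right (by omega)]
    rw [List.foldl_append]
    rw [ih m]
    simp only [List.foldl_cons, List.foldl_nil, pvAOrBit]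
    rw [show ((a : Int) + (n : Nat)).toNat = a + n by omega, pv_shift_cast_nat, PySem.Int.bor_natCast]
    rw [pvMaskN_succ]
    norm_num [Nat.or_assoc]

-- the two loop shapes agree on a Nat-cast accumulator
theorem pv_loop_eq (r : List Char) (m : Nat) :
    pvALoop (m : Int) r = (pvPairs r).foldl pvMaskStep (m : Int) := by
  induction r using pvPairs.induct generalizing m with
  | case2 x h =>
    rcases x with _ | ⟨c, _ | ⟨c', t⟩⟩
    · rfl
    · rfl
    · exact (h c c' t rfl).elim
  | case1 c0 c1 rest ih =>
    rw [pvALoop, pvPairs, List.foldl_cons]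
    simp only [pvMaskStep]
    by_cases h : c0.toNat ≤ c1.toNat
    · have hsplit : ((c1.toNat : Int) + 1) = (c0.toNat : Int) + ((c1.toNat + 1 - c0.toNat : Nat) : Int) := by
        omega
      rw [hsplit, pv_rangeFold c0.toNat (c1.toNat + 1 - c0.toNat) m, ih]
      congr 1
      rw [if_pos h, pv_shift_sub_cast, pv_shift_sub_cast, PySem.Int.bxor_natCast,
          PySem.Int.bor_natCast]
      have he : c0.toNat + (c1.toNat + 1 - c0.toNat) = c1.toNat + 1 := by omega
      simp [pvMaskN, he]
    · have hempty : PySem.List.pyRange (c0.toNat : Int) ((c1.toNat : Int) + 1) 1 = [] :=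
        PySem.List.pyRange_one_eq_nil (by omega)
      rw [hempty, List.foldl_nil, ih, if_neg h]

-- ===== VERDICT (by name: the statement is the Claim_ definition above) =====
theorem bitsetRange_spec : Claim_equal_bitsetRange := by
  intro chars ranges _
  unfold Spec_bitsetRange bitsetRange bitsetRange_alt
  rw [show (0 : Int) = ((0 : Nat) : Int) by rfl, pv_charFold_cast]
  exact pv_loop_eq _ _
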